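-- pv_equiv track=rewrite | github.com/AmberLee2427/roman-skills | skills/plotting/style-profiles/scripts/check_style_profile.py | marker_or_style_distinguishable
-- ===== SOURCE A (Python) =====
-- def marker_or_style_distinguishable(series: list[dict]) -> bool:
--     for i in range(len(series)):
--         for j in range(i + 1, len(series)):
--             a = series[i]
--             b = series[j]
--             if str(a.get("marker", "")) == str(b.get("marker", "")) and str(a.get("linestyle", "")) == str(b.get("linestyle", "")):
--                 return False
--     return True
-- ===== SOURCE B (Python) =====
-- def marker_or_style_distinguishable(series: list[dict]) -> bool:
--     seen = set()
--     for s in series: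
--         key = (str(s.get("marker", "")), str(s.get("linestyle", "")))
--         if key in seen:
--             return False
--         seen.add(key)
--     return True
-- ===== Notes on version B (the rewrite author's own statement) =====
-- stated objective: alternative
-- what changed: Replaced A's nested all-pairs index scan with a single pass that records each normalized (marker, linestyle) key in a set and fails on the first repeat.
import Mathlib
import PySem

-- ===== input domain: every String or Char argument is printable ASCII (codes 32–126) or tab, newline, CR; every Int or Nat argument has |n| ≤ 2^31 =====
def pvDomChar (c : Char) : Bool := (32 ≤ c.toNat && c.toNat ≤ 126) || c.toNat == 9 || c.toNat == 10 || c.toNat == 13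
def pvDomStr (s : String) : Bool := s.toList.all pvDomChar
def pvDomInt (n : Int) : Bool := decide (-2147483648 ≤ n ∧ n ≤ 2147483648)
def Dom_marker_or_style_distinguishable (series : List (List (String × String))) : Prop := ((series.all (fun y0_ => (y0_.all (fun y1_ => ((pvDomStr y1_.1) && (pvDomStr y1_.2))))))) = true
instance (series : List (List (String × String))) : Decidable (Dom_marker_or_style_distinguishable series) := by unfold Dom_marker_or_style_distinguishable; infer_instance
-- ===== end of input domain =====

-- B replaces A's nested all-pairs scan by one pass over the series recording each
-- normalized (marker, linestyle) key in a set and failing on the first repeat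
-- (objective: alternative single-pass algorithm).

-- ===== PORT A =====
-- s.get(k, "") on a dict (association list, first match); str() of the String value is the identity
def pvGet (s : List (String × String)) (k : String) : String :=
  (PySem.Dict.mk s).getD k ""

-- inner loop 'for j in range(i+1, len(series))' over the suffix after element i
def pvAInner (a : List (String × String)) : List (List (String × String)) → Bool
  | [] => true
  | b :: bs =>
      if (pvGet a "marker" == pvGet b "marker") && (pvGet a "linestyle" == pvGet b "linestyle")
      then false
      else pvAInner a bs

-- outer loop 'for i in range(len(series))'
def pvAOuter : List (List (String × String)) → Bool
  | [] => true
  | a :: rest => pvAInner a rest && pvAOuter rest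

def marker_or_style_distinguishable (series : List (List (String × String))) : Bool :=
  pvAOuter series

-- ===== PORT B =====
def pvKey (s : List (String × String)) : String × String :=
  (pvGet s "marker", pvGet s "linestyle")

-- 'for s in series: if key in seen: return False; seen.add(key)'
def pvBLoop (seen : PySem.Set (String × String)) : List (List (String × String)) → Bool
  | [] => true
  | s :: rest =>
      let key := pvKey s
      if PySem.Set.contains seen key then false
      else pvBLoop (PySem.Set.add seen key) rest

def marker_or_style_distinguishable_alt (series : List (List (String × String))) : Bool :=
  pvBLoop PySem.Set.empty series

-- ===== PRECONDITION & SPEC =====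
def Spec_marker_or_style_distinguishable (series : List (List (String × String))) (out : Bool) : Prop := out = marker_or_style_distinguishable_alt series
instance (series : List (List (String × String))) (out : Bool) : Decidable (Spec_marker_or_style_distinguishable series out) := by unfold Spec_marker_or_style_distinguishable; infer_instance

-- ===== CLAIM (what is proved, stated in full; the proofs are below) =====
def Claim_equal_marker_or_style_distinguishable : Prop := ∀ (series : List (List (String × String))), Dom_marker_or_style_distinguishable series → Spec_marker_or_style_distinguishable series (marker_or_style_distinguishable series)

-- ===== LEMMAS AND PROOFS =====

-- A's inner loop checks a's key against every later key
theorem pvAInner_eq_all (a : List (String × String)) (l : List (List (String × String))) :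
    pvAInner a l = l.all (fun b => !(pvKey a == pvKey b)) := by
  induction l with
  | nil => rfl
  | cons b bs ih =>
      by_cases h : pvKey a = pvKey b
      · simp [pvAInner, List.all_cons, pvKey] at *
        simp [h.1, h.2]
      · have : (pvKey a == pvKey b) = false := by simp [h]
        simp only [pvKey, Prod.mk.injEq] at h
        simp [pvAInner, List.all_cons, ih, this]
        simp only [pvKey, Prod.mk.injEq] at this ⊢
        tauto

-- A returns true exactly when the key list has no duplicates
theorem pvAOuter_nodup (l : List (List (String × String))) :
    pvAOuter l = true ↔ (l.map pvKey).Nodup := by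
  induction l with
  | nil => simp [pvAOuter]
  | cons a rest ih =>
      simp [pvAOuter, pvAInner_eq_all, ih, List.nodup_cons, List.all_eq_true, List.mem_map]
      intro _
      constructor <;> intro hh x hx <;> exact fun he => hh x hx he.symm

-- B returns true exactly when no key is in 'seen' and the key list has no duplicates
theorem pvBLoop_nodup (l : List (List (String × String))) :
    ∀ seen : PySem.Set (String × String),
      pvBLoop seen l = true ↔ ((∀ k ∈ l.map pvKey, k ∉ seen) ∧ (l.map pvKey).Nodup) := by
  induction l with
  | nil => simp [pvBLoop]
  | cons s rest ih =>
      intro seen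
      by_cases h : pvKey s ∈ seen
      · simp [pvBLoop, PySem.Set.contains, h]
      · have hc : PySem.Set.contains seen (pvKey s) = false := by
          simp [PySem.Set.contains, h]
        simp only [pvBLoop, hc, Bool.false_eq_true, if_false]
        rw [ih]
        simp only [List.map_cons, List.mem_cons, List.nodup_cons]
        constructor
        · rintro ⟨h1, h2⟩
          refine ⟨?_, ?_, h2⟩
          · rintro k (rfl | hk)
            · exact h
            · exact fun hs => (h1 k hk) (by simp [PySem.Set.mem_add, hs])
          · intro hmem
            exact (h1 _ hmem) (by simp [PySem.Set.mem_add])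
        · rintro ⟨h1, h2, h3⟩
          refine ⟨?_, h3⟩
          intro k hk hadd
          rcases (PySem.Set.mem_add _ _ _).1 hadd with h' | h'
          · exact h1 k (Or.inr hk) h'
          · exact h2 (h' ▸ hk)

-- ===== VERDICT (by name: the statement is the Claim_ definition above) =====
theorem marker_or_style_distinguishable_spec : Claim_equal_marker_or_style_distinguishable := by
  intro series _
  unfold Spec_marker_or_style_distinguishable marker_or_style_distinguishable marker_or_style_distinguishable_alt
  rw [Bool.eq_iff_iff, pvAOuter_nodup, pvBLoop_nodup]
  simp [PySem.Set.empty]
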